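-- pv_equiv track=rewrite | github.com/Yanksi/nccl_generator_v2 | nsys_events_common.py | _rule_pp
-- ===== SOURCE A (Python) =====
-- def _rule_pp(label_seq: str) -> bool:
--     """
--     Check for pipeline parallelism pattern.
--     Sequence of alternating E and F with even length.
--     """
--     if len(label_seq) % 2 != 0:
--         return False
--     first_two = label_seq[:2]
--     if first_two not in ["EF", "FE"]:
--         return False
--     for i in range(0, len(label_seq), 2):
--         if label_seq[i : i + 2] != first_two:
--             return False
--     return True
-- ===== SOURCE B (Python) =====
-- def _rule_pp(label_seq: str) -> bool:
--     n = len(label_seq)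
--     if n == 0 or n % 2 != 0:
--         return False
--     prev = None
--     for ch in label_seq:
--         if ch != 'E' and ch != 'F':
--             return False
--         if ch == prev:
--             return False
--         prev = ch
--     return True
-- ===== Notes on version B (the rewrite author's own statement) =====
-- stated objective: simpler
-- what changed: Replaced A's 2-char-chunk scan (slicing label_seq[i:i+2] over range(0, n, 2) and comparing each chunk to the first pair) by a single-character adjacency scan: reject empty or odd length, then check every character is 'E' or 'F' and differs from its predecessor.
import Mathlib
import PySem

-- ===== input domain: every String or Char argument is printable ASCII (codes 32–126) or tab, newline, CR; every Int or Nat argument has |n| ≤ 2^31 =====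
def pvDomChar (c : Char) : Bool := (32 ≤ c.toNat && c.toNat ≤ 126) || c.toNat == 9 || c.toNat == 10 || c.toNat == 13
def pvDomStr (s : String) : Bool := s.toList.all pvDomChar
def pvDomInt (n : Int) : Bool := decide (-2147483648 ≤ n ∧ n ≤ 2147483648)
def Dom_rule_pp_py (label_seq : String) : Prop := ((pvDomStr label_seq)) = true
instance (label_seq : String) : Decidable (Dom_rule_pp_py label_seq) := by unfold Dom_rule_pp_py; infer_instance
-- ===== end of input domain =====

-- B replaces A's chunked scan (2-char slices over range(0, n, 2) compared to a fixed
-- template) by a single-character adjacency scan; objective: simpler.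

-- ===== PORT A =====
-- for i in range(0, len(label_seq), 2): if label_seq[i:i+2] != first_two: return False
def pvALoop (l ft : List Char) : List Int → Bool
  | [] => true
  | i :: rest =>
      if PySem.List.slice l (some i) (some (i + 2)) ≠ ft then false
      else pvALoop l ft rest

def rule_pp_py (label_seq : String) : Bool :=
  if PySem.Int.mod (PySem.Str.len label_seq) 2 ≠ 0 then false
  else
    let first_two := PySem.List.slice label_seq.toList none (some 2)
    if ¬ (first_two = ['E', 'F'] ∨ first_two = ['F', 'E']) then false
    else pvALoop label_seq.toList first_two
           (PySem.List.pyRange 0 (PySem.Str.len label_seq) 2)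

-- ===== PORT B =====
-- prev = None; for ch in label_seq: reject non-E/F and repeats, prev = ch
def pvBLoop : List Char → Option Char → Bool
  | [], _ => true
  | c :: rest, prev =>
      if ¬ (c = 'E' ∨ c = 'F') then false
      else if some c = prev then false
      else pvBLoop rest (some c)

def rule_pp_py_alt (label_seq : String) : Bool :=
  let n := PySem.Str.len label_seq
  if n = 0 ∨ PySem.Int.mod n 2 ≠ 0 then false
  else pvBLoop label_seq.toList none

-- ===== PRECONDITION & SPEC =====
def Spec_rule_pp_py (label_seq : String) (out : Bool) : Prop := out = rule_pp_py_alt label_seq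
instance (label_seq : String) (out : Bool) : Decidable (Spec_rule_pp_py label_seq out) := by unfold Spec_rule_pp_py; infer_instance

-- ===== CLAIM (what is proved, stated in full; the proofs are below) =====
def Claim_equal_rule_pp_py : Prop := ∀ (label_seq : String), Dom_rule_pp_py label_seq → Spec_rule_pp_py label_seq (rule_pp_py label_seq)

-- ===== LEMMAS AND PROOFS =====

-- A's loop, restated as a structural pair recursion
def pvPairsEq (ft : List Char) : List Char → Bool
  | [] => true
  | [a] => decide ([a] = ft)
  | a :: b :: r => decide ([a, b] = ft) && pvPairsEq ft r

theorem pvPyRange_two_nil (a b : Int) (h : b ≤ a) :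
    PySem.List.pyRange a b 2 = [] := by
  rw [PySem.List.pyRange_of_pos a b (by norm_num)]
  simp [if_neg (by omega : ¬ a < b)]

theorem pvPyRange_two_cons (a b : Int) (h : a < b) :
    PySem.List.pyRange a b 2 = a :: PySem.List.pyRange (a + 2) b 2 := by
  rw [PySem.List.pyRange_of_pos a b (by norm_num),
      PySem.List.pyRange_of_pos (a + 2) b (by norm_num)]
  by_cases h2 : a + 2 < b
  · rw [if_pos h, if_pos h2]
    have hn : ((b - a + 2 - 1) / 2).toNat = ((b - (a + 2) + 2 - 1) / 2).toNat + 1 := by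
      omega
    rw [hn, List.range_succ_eq_map]
    simp only [List.map_cons, List.map_map, Nat.cast_zero, mul_zero, add_zero]
    congr 1
    apply List.map_congr_left
    intro k _
    simp only [Function.comp_apply, Nat.cast_succ]
    ring
  · rw [if_pos h, if_neg h2]
    have hn : ((b - a + 2 - 1) / 2).toNat = 1 := by omega
    rw [hn]
    simp

theorem pvALoop_eq (l ft : List Char) :
    ∀ k : Nat, pvALoop l ft (PySem.List.pyRange (k : Int) (l.length : Int) 2)
      = pvPairsEq ft (l.drop k) := by
  intro k
  by_cases hk : l.length ≤ k
  · rw [pvPyRange_two_nil _ _ (by exact_mod_cast hk)]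
    rw [List.drop_eq_nil_of_le hk]
    rfl
  · push Not at hk
    rw [pvPyRange_two_cons _ _ (by exact_mod_cast hk)]
    have hs : PySem.List.slice l (some (k : Int)) (some ((k : Int) + 2))
        = (l.drop k).take 2 := by
      rw [PySem.List.slice_toNat l (by positivity) (by positivity)]
      congr 1 <;> omega
    have hrec : pvALoop l ft (PySem.List.pyRange ((k : Int) + 2) (l.length : Int) 2)
        = pvPairsEq ft (l.drop (k + 2)) := by
      have := pvALoop_eq l ft (k + 2)
      simpa [Int.natCast_add] using this
    show (if PySem.List.slice l (some (k : Int)) (some ((k : Int) + 2)) ≠ ft then false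
          else pvALoop l ft (PySem.List.pyRange ((k : Int) + 2) (l.length : Int) 2))
        = pvPairsEq ft (l.drop k)
    rw [hs, hrec]
    obtain ⟨a, m, hm⟩ : ∃ a m, l.drop k = a :: m := by
      cases hdk : l.drop k with
      | nil => exact absurd (List.drop_eq_nil_iff.mp hdk) (by omega)
      | cons a m => exact ⟨a, m, rfl⟩
    have hdd : l.drop (k + 2) = (l.drop k).drop 2 := by
      rw [List.drop_drop]
    rw [hm, hdd, hm]
    cases m with
    | nil => simp [pvPairsEq]
    | cons b r =>
      by_cases hft : [a, b] = ft
      · simp [pvPairsEq, hft]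
      · simp [pvPairsEq, hft]
termination_by k => l.length - k
decreasing_by omega

-- B's scan equals A's pair check, for an even-length tail after a valid first pair
theorem pvScan_eq (a b : Char)
    (hab : (a = 'E' ∧ b = 'F') ∨ (a = 'F' ∧ b = 'E')) :
    ∀ r : List Char, r.length % 2 = 0 →
      pvPairsEq [a, b] r = pvBLoop r (some b) := by
  intro r hr
  match r with
  | [] => rfl
  | [c] => simp at hr
  | c :: d :: r' =>
    have ih := pvScan_eq a b hab r' (by simp at hr; omega)
    rcases hab with ⟨ha, hb⟩ | ⟨ha, hb⟩ <;> subst ha <;> subst hb <;>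
      by_cases hc : c = 'E' <;> by_cases hc2 : c = 'F' <;>
      by_cases hd : d = 'E' <;> by_cases hd2 : d = 'F' <;>
      simp_all [pvPairsEq, pvBLoop]
termination_by r => r.length

-- a first pair that is not "EF"/"FE" makes B's scan fail within the first two characters
theorem pvBLoop_bad (c d : Char) (r : List Char)
    (h : ¬ ([c, d] = ['E', 'F'] ∨ [c, d] = ['F', 'E'])) :
    pvBLoop (c :: d :: r) none = false := by
  by_cases hc : c = 'E' <;> by_cases hc2 : c = 'F' <;>
    by_cases hd : d = 'E' <;> by_cases hd2 : d = 'F' <;>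
    simp_all [pvBLoop]

theorem pvMod_two (n : Nat) : PySem.Int.mod (n : Int) 2 = 0 ↔ n % 2 = 0 := by
  rw [PySem.Int.mod_eq_zero_iff_dvd]; omega

-- ===== VERDICT (by name: the statement is the Claim_ definition above) =====
theorem rule_pp_py_spec : Claim_equal_rule_pp_py := by
  intro s _
  unfold Spec_rule_pp_py rule_pp_py rule_pp_py_alt
  have hlen : PySem.Str.len s = (s.toList.length : Int) := PySem.Str.len_eq s
  by_cases hpar : s.toList.length % 2 = 0
  · -- even length
    have hm : PySem.Int.mod (PySem.Str.len s) 2 = 0 := by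
      rw [hlen]; exact (pvMod_two _).mpr hpar
    rw [if_neg (by simpa using hm)]
    cases hls : s.toList with
    | nil =>
      have hz : PySem.Str.len s = 0 := by rw [hlen, hls]; rfl
      rw [if_pos (Or.inl hz)]
      rw [if_pos]
      intro h
      rcases h with h | h <;> exact absurd h (by decide)
    | cons c m =>
      cases m with
      | nil => rw [hls] at hpar; simp at hpar
      | cons d r =>
        have hnz : ¬ (PySem.Str.len s = 0 ∨ PySem.Int.mod (PySem.Str.len s) 2 ≠ 0) := by
          push Not
          refine ⟨by rw [hlen, hls]; simp only [List.length_cons]; push_cast; omega,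
            by simpa using hm⟩
        rw [if_neg hnz]
        have hft : PySem.List.slice (c :: d :: r) none (some 2) = [c, d] := by
          rw [PySem.List.slice_to (c :: d :: r) (by norm_num : (0:Int) ≤ 2)]
          rfl
        rw [hft]
        by_cases hv : [c, d] = ['E', 'F'] ∨ [c, d] = ['F', 'E']
        · rw [if_neg (not_not_intro hv)]
          have hcd : (c = 'E' ∧ d = 'F') ∨ (c = 'F' ∧ d = 'E') := by
            rcases hv with h | h <;> [left; right] <;> simp_all
          have hA : pvALoop (c :: d :: r) [c, d]
              (PySem.List.pyRange 0 (PySem.Str.len s) 2) = pvPairsEq [c, d] (c :: d :: r) := by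
            rw [hlen, hls]
            have := pvALoop_eq (c :: d :: r) [c, d] 0
            simpa using this
          rw [hA]
          have hre : r.length % 2 = 0 := by rw [hls] at hpar; simp at hpar; omega
          have hscan := pvScan_eq c d hcd r hre
          have hcd' : c ≠ d := by
            rcases hcd with ⟨h1, h2⟩ | ⟨h1, h2⟩ <;> subst h1 <;> subst h2 <;> decide
          have hBstep : pvBLoop (c :: d :: r) none = pvBLoop r (some d) := by
            have hcEF : c = 'E' ∨ c = 'F' := by
              rcases hcd with ⟨h1, _⟩ | ⟨h1, _⟩ <;> subst h1 <;> simp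
            have hdEF : d = 'E' ∨ d = 'F' := by
              rcases hcd with ⟨_, h2⟩ | ⟨_, h2⟩ <;> subst h2 <;> simp
            simp [pvBLoop, hcEF, hdEF, Ne.symm hcd']
          rw [hBstep, ← hscan]
          simp [pvPairsEq]
        · rw [if_pos hv, pvBLoop_bad c d r hv]
  · -- odd length: both sides are false
    have hm : PySem.Int.mod (PySem.Str.len s) 2 ≠ 0 := by
      rw [hlen]; exact fun h => hpar ((pvMod_two _).mp h)
    rw [if_pos hm, if_pos (Or.inr hm)]
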